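-- pv_equiv track=rewrite | github.com/kLiHz/learn-nlp | src/lab/02/calc.py | calc_hits
-- ===== SOURCE A (Python) =====
-- special_characters = set(list("()[]+-*/<>|\\;:\"\'\,.?!@#$%^&~`\{\}（）【】《》，。？“”‘’；：——「」『』〔〕"))
--
-- def calc_hits(truth, result):
--     # 传入分词得到的结果（列表），以及“正确分词”结果
--     cut_truth = [item for item in truth if item not in special_characters]
--     cut_result = [item for item in result if item not in special_characters]
--     i = 0  # 指向 truth 中的 token
--     j = 0  # 指向 result 中的 token
--     l1 = 0 # i 所指向词串，对应在原句中的长度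
--     l2 = 0 # j 所指向词串，对应在原句中的长度
--     hits = 0
--     missmatches = set()
--     while i < len(cut_truth) and j < len(cut_result):
--         if l1 < l2:
--             l1 += len(cut_truth[i])
--             i += 1
--         elif l1 > l2:
--             l2 += len(cut_result[j])
--             j += 1
--         else:
--             if cut_truth[i] == cut_result[j]:
--                 hits += 1
--             else:
--                 missmatches.add(cut_truth[i])
--             l1 += len(cut_truth[i])
--             i += 1
--             l2 += len(cut_result[j])
--             j += 1
--     return hits, missmatches
-- ===== SOURCE B (Python) =====
-- special_characters = set(list("()[]+-*/<>|\\;:\"\'\,.?!@#$%^&~`\{\}（）【】《》，。？“”‘’；：——「」『』〔〕"))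
--
-- def calc_hits(truth, result):
--     # Index cut_result by starting character offset (a list per offset, to
--     # keep empty tokens paired in order), then walk cut_truth once.
--     cut_truth = [item for item in truth if item not in special_characters]
--     cut_result = [item for item in result if item not in special_characters]
--     index = {}
--     off = 0
--     for tok in cut_result:
--         index.setdefault(off, []).append(tok)
--         off += len(tok)
--     hits = 0
--     missmatches = set()
--     off = 0
--     for tok in cut_truth:
--         group = index.get(off)
--         if group:
--             r = group.pop(0)
--             if r == tok:
--                 hits += 1
--             else:
--                 missmatches.add(tok)
--         off += len(tok)
--     return hits, missmatches
-- ===== Notes on version B (the rewrite author's own statement) =====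
-- stated objective: alternative
-- what changed: Replaces A's two-pointer merge over both token lists (with two running offsets compared each step) by a dictionary built in one pass mapping each start offset to the ordered list of result tokens there, then a single walk of the truth tokens popping the matching-offset entry.
import Mathlib
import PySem

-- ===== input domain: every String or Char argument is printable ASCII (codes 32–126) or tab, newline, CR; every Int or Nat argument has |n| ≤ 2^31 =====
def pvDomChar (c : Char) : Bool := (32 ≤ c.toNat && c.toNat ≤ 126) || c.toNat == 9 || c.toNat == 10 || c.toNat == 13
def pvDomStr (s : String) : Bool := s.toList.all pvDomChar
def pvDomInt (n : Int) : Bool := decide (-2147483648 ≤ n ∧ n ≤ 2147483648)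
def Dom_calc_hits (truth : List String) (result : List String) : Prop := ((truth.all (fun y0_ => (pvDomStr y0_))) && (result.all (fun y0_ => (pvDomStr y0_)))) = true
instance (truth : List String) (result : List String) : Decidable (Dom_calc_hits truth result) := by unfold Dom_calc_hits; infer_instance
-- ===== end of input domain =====

-- B replaces A's two-pointer walk with an offset-indexed dictionary of the result tokens
-- (one build pass, one lookup pass); objective: alternative data structure, same value.

-- ===== PORT A =====
def specialCharacters : PySem.Set String :=
  PySem.Set.ofList (("()[]+-*/<>|\\;:\"',.?!@#$%^&~`{}（）【】《》，。？“”‘’；：——「」『』〔〕").toList.map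
    (fun c => String.ofList [c]))

-- the while loop of A: state (cut_truth from i, cut_result from j, l1, l2, hits, missmatches)
def calcLoopA : List String → List String → Int → Int → Int → PySem.Set String → Int × PySem.Set String
  | [], _, _, _, hits, miss => (hits, miss)
  | _ :: _, [], _, _, hits, miss => (hits, miss)
  | t :: ts, r :: rs, l1, l2, hits, miss =>
    if l1 < l2 then calcLoopA ts (r :: rs) (l1 + PySem.Str.len t) l2 hits miss
    else if l2 < l1 then calcLoopA (t :: ts) rs l1 (l2 + PySem.Str.len r) hits miss
    else if t = r then
      calcLoopA ts rs (l1 + PySem.Str.len t) (l2 + PySem.Str.len r) (hits + 1) miss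
    else
      calcLoopA ts rs (l1 + PySem.Str.len t) (l2 + PySem.Str.len r) hits (PySem.Set.add miss t)
  termination_by ts rs _ _ _ _ => ts.length + rs.length
  decreasing_by all_goals (simp; try omega)

def calc_hits (truth : List String) (result : List String) : Int × List String :=
  let cutTruth := truth.filter (fun item => !(PySem.Set.contains specialCharacters item))
  let cutResult := result.filter (fun item => !(PySem.Set.contains specialCharacters item))
  calcLoopA cutTruth cutResult 0 0 0 PySem.Set.empty

-- ===== PORT B =====
-- first pass of B: index.setdefault(off, []).append(tok); off += len(tok)
def buildIndex : Int → List String → PySem.Dict Int (List String) → PySem.Dict Int (List String)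
  | _, [], d => d
  | off, tok :: rs, d =>
    buildIndex (off + PySem.Str.len tok) rs (d.modify off [] (fun g => g ++ [tok]))

-- second pass of B: group = index.get(off); if group: r = group.pop(0); compare
def bLoop : List String → Int → PySem.Dict Int (List String) → Int → PySem.Set String → Int × PySem.Set String
  | [], _, _, hits, miss => (hits, miss)
  | tok :: ts, off, d, hits, miss =>
    match d.getD off [] with
    | [] => bLoop ts (off + PySem.Str.len tok) d hits miss
    | r :: g =>
      if r = tok then bLoop ts (off + PySem.Str.len tok) (d.insert off g) (hits + 1) miss
      else bLoop ts (off + PySem.Str.len tok) (d.insert off g) hits (PySem.Set.add miss tok)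

def calc_hits_alt (truth : List String) (result : List String) : Int × List String :=
  let cutTruth := truth.filter (fun item => !(PySem.Set.contains specialCharacters item))
  let cutResult := result.filter (fun item => !(PySem.Set.contains specialCharacters item))
  bLoop cutTruth 0 (buildIndex 0 cutResult PySem.Dict.empty) 0 PySem.Set.empty

-- ===== PRECONDITION & SPEC =====
def Spec_calc_hits (truth : List String) (result : List String) (out : Int × List String) : Prop := out = calc_hits_alt truth result
instance (truth : List String) (result : List String) (out : Int × List String) : Decidable (Spec_calc_hits truth result out) := by unfold Spec_calc_hits; infer_instance

-- ===== CLAIM (what is proved, stated in full; the proofs are below) =====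
def Claim_equal_calc_hits : Prop := ∀ (truth : List String) (result : List String), Dom_calc_hits truth result → Spec_calc_hits truth result (calc_hits truth result)

-- ===== LEMMAS AND PROOFS =====

-- the list of result tokens whose running start offset (from l) is exactly o
def grp (o : Int) : Int → List String → List String
  | _, [] => []
  | l, r :: rs => if l = o then r :: grp o (l + PySem.Str.len r) rs else grp o (l + PySem.Str.len r) rs

theorem strLen_nonneg (s : String) : 0 ≤ PySem.Str.len s := by
  simp [PySem.Str.len_eq]

theorem grp_eq_nil_of_lt (o : Int) (rs : List String) : ∀ l, o < l → grp o l rs = [] := by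
  induction rs with
  | nil => intro l _; rfl
  | cons r rs ih =>
      intro l h
      have hr := strLen_nonneg r
      simp only [grp]
      rw [if_neg (by omega)]
      exact ih _ (by omega)

theorem buildIndex_getD (rs : List String) :
    ∀ (l : Int) (d : PySem.Dict Int (List String)) (o : Int),
      (buildIndex l rs d).getD o [] = d.getD o [] ++ grp o l rs := by
  induction rs with
  | nil => intro l d o; simp [buildIndex, grp]
  | cons r rs ih =>
      intro l d o
      simp only [buildIndex, grp]
      rw [ih]
      rw [PySem.Dict.getD_modify]
      by_cases ho : o = l
      · subst ho; simp
      · rw [if_neg ho, if_neg (fun h => ho h.symm)]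

theorem loop_eq (n : Nat) :
    ∀ (ts rs : List String) (l1 l2 hits : Int) (miss : PySem.Set String)
      (d : PySem.Dict Int (List String)),
      ts.length + rs.length ≤ n →
      (∀ o, l1 ≤ o → d.getD o [] = grp o l2 rs) →
      calcLoopA ts rs l1 l2 hits miss = bLoop ts l1 d hits miss := by
  induction n with
  | zero =>
      intro ts rs l1 l2 hits miss d hn _
      have : ts = [] := by cases ts <;> simp_all
      subst this
      cases rs <;> simp [calcLoopA, bLoop]
  | succ n ih =>
      intro ts rs l1 l2 hits miss d hn hinv
      cases ts with
      | nil => cases rs <;> simp [calcLoopA, bLoop]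
      | cons t ts =>
        have ht := strLen_nonneg t
        cases rs with
        | nil =>
            have hd : d.getD l1 [] = [] := hinv l1 le_rfl
            simp only [calcLoopA, bLoop, hd]
            rw [← ih ts [] (l1 + PySem.Str.len t) l2 hits miss d (by simp at hn ⊢; omega)
                  (fun o ho => hinv o (by omega))]
            cases ts <;> simp [calcLoopA]
        | cons r rs =>
            have hr := strLen_nonneg r
            simp only [calcLoopA]
            by_cases h12 : l1 < l2
            · -- A advances truth; B's lookup is empty (all remaining result offsets ≥ l2 > l1)
              rw [if_pos h12]
              have hd : d.getD l1 [] = [] := by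
                rw [hinv l1 le_rfl]
                simp only [grp]
                rw [if_neg (by omega)]
                exact grp_eq_nil_of_lt _ _ _ (by omega)
              simp only [bLoop, hd]
              exact ih ts (r :: rs) (l1 + PySem.Str.len t) l2 hits miss d
                (by simp at hn ⊢; omega) (fun o ho => hinv o (by omega))
            · rw [if_neg h12]
              by_cases h21 : l2 < l1
              · -- A drops a result token; B does nothing (its offset l2 < l1 is never looked up)
                rw [if_pos h21]
                exact ih (t :: ts) rs l1 (l2 + PySem.Str.len r) hits miss d
                  (by simp at hn ⊢; omega)
                  (fun o ho => by
                    rw [hinv o ho]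
                    simp only [grp]
                    rw [if_neg (by omega)])
              · -- l1 = l2: both compare t with r
                have heq : l1 = l2 := by omega
                rw [if_neg h21]
                have hd : d.getD l1 [] = r :: grp l1 (l2 + PySem.Str.len r) rs := by
                  rw [hinv l1 le_rfl]
                  simp only [grp]
                  rw [if_pos heq.symm]
                have hinv' : ∀ o, l1 + PySem.Str.len t ≤ o →
                    (d.insert l1 (grp l1 (l2 + PySem.Str.len r) rs)).getD o [] =
                      grp o (l2 + PySem.Str.len r) rs := by
                  intro o ho
                  rw [PySem.Dict.getD_insert]
                  by_cases hol : o = l1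
                  · subst hol; simp
                  · rw [if_neg hol, hinv o (by omega)]
                    simp only [grp]
                    rw [if_neg (by omega)]
                by_cases htr : t = r
                · rw [if_pos htr]
                  simp only [bLoop, hd]
                  rw [if_pos htr.symm]
                  exact ih ts rs (l1 + PySem.Str.len t) (l2 + PySem.Str.len r) (hits + 1) miss _
                    (by simp at hn ⊢; omega) hinv'
                · rw [if_neg htr]
                  simp only [bLoop, hd]
                  rw [if_neg (fun h => htr h.symm)]
                  exact ih ts rs (l1 + PySem.Str.len t) (l2 + PySem.Str.len r) hits
                    (PySem.Set.add miss t) _ (by simp at hn ⊢; omega) hinv'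

-- ===== VERDICT (by name: the statement is the Claim_ definition above) =====
theorem calc_hits_spec : Claim_equal_calc_hits := by
  intro truth result _
  unfold Spec_calc_hits calc_hits calc_hits_alt
  apply loop_eq ((truth.filter (fun item => !(PySem.Set.contains specialCharacters item))).length +
      (result.filter (fun item => !(PySem.Set.contains specialCharacters item))).length)
  · exact le_rfl
  · intro o _
    rw [buildIndex_getD]
    simp [PySem.Dict.getD_empty]
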